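-- pv_equiv track=rewrite | github.com/Snowwpanda/adventofcode | adventofcode21/17/17.py | psbl_for_steps
-- ===== SOURCE A (Python) =====
-- def cal_x(start, steps):
--     slowest = max(start - steps, 0)
--     return ((start * (start + 1)) - (slowest * (slowest + 1))) // 2
--
-- def cal_y(start, steps):
--     velo_dist = steps * start
--     gravity = (steps * (steps - 1)) // 2
--     return velo_dist - gravity
--
-- def binsearch_xmin(param, steps):
--     left = 0
--     right = param
--     while left != right:
--         start = (left + right) // 2
--         if cal_x(start, steps) < param:
--             left = start + 1
--         else:
--             right = start
--     return left
--
-- def binsearch_ymin(param, steps):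
--     # assuming param negative
--     left = param
--     right = steps
--     while left != right:
--         start = (left + right) // 2
--         if cal_y(start, steps) < param:
--             left = start + 1
--         else:
--             right = start
--     return left
--
-- def binsearch_xmax(param, steps):
--     left = 0
--     right = param
--     while left != right:
--         start = (left + right + 1) // 2
--         if cal_x(start, steps) > param:
--             right = start - 1
--         else:
--             left = start
--     return left
--
-- def binsearch_ymax(param, steps):
--     # assuming param negative
--     left = param
--     right = steps
--     while left != right:
--         start = (left + right + 1) // 2
--         if cal_y(start, steps) > param:
--             right = start - 1
--         else:
--             left = start
--     return left
--
-- def psbl_for_steps(steps, target_area):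
--     x_min = binsearch_xmin(target_area[0][0], steps)
--     x_max = binsearch_xmax(target_area[0][1], steps)
--     y_min = binsearch_ymin(target_area[1][0], steps)
--     y_max = binsearch_ymax(target_area[1][1], steps)
--     if cal_y(y_max+1, steps) <= target_area[1][1] or cal_y(y_min-1, steps) >= target_area[1][0] \
--             or cal_x(x_max+1, steps) <= target_area[0][1] or cal_x(x_min-1, steps) >= target_area[0][0]:
--         pass
--     if cal_y(y_max, steps) > target_area[1][1] or cal_y(y_min, steps) < target_area[1][0] \
--             or cal_x(x_max, steps) > target_area[0][1] or cal_x(x_min, steps) < target_area[0][0]: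
--         pass
--     if x_min <= x_max and y_min <= y_max:
--         return [(i, j) for i in range(x_min, x_max+1) for j in range(y_min, y_max+ 1)]
--     else:
--         return []
-- ===== SOURCE B (Python) =====
-- def cal_y(start, steps):
--     return steps * start - (steps * (steps - 1)) // 2
--
--
-- def tri(n):
--     return n * (n + 1) // 2
--
--
-- def ceil_div(a, b):
--     return -((-a) // b)
--
--
-- def clamp(v, lo, hi):
--     return min(max(v, lo), hi)
--
--
-- def x_lower(p, steps, hi):
--     # least velocity v in [0, hi] whose x-distance after `steps` steps is >= p, else hi
--     for v in range(0, min(steps, hi) + 1):  # rising regime: distance = tri(v)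
--         if tri(v) >= p:
--             return v
--     if steps >= 1:  # stalled regime: distance = steps*v - tri(steps-1), linear in v
--         return min(ceil_div(p + tri(steps - 1), steps), hi)
--     return hi
--
--
-- def x_upper(p, steps, hi):
--     # greatest velocity v in [0, hi] whose x-distance after `steps` steps is <= p, else 0
--     if steps <= 0:
--         return hi  # nothing moves forward: every distance is <= 0 <= p
--     best = 0
--     for v in range(0, min(steps, hi) + 1):  # rising regime: distance = tri(v)
--         if tri(v) > p:
--             break
--         best = v
--     if steps < hi and best == steps:  # stalled regime: distance = steps*v - tri(steps-1)
--         best = min((p + tri(steps - 1)) // steps, hi)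
--     return best
--
--
-- def y_lower(p, steps, lo, hi):
--     # least velocity v in [lo, hi] whose y-position after `steps` steps is >= p, else hi
--     if steps >= 1:  # position = steps*v - tri(steps-1), increasing in v
--         return clamp(ceil_div(p + tri(steps - 1), steps), lo, hi)
--     return lo if cal_y(lo, steps) >= p else hi
--
--
-- def y_upper(p, steps, lo, hi):
--     # greatest velocity v in [lo, hi] whose y-position after `steps` steps is <= p, else lo
--     if steps >= 1:  # position = steps*v - tri(steps-1), increasing in v
--         return clamp((p + tri(steps - 1)) // steps, lo, hi)
--     return hi if cal_y(hi, steps) <= p else lo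
--
--
-- def psbl_for_steps(steps, target_area):
--     x_lo, x_hi = target_area[0][0], target_area[0][1]
--     y_lo, y_hi = target_area[1][0], target_area[1][1]
--     x_min = x_lower(x_lo, steps, x_lo)
--     x_max = x_upper(x_hi, steps, x_hi)
--     y_min = y_lower(y_lo, steps, y_lo, steps)
--     y_max = y_upper(y_hi, steps, y_hi, steps)
--     if x_min <= x_max and y_min <= y_max:
--         return [(i, j) for i in range(x_min, x_max + 1) for j in range(y_min, y_max + 1)]
--     return []
-- ===== Notes on version B (the rewrite author's own statement) =====
-- stated objective: alternative
-- what changed: Replaced A's four binary searches by direct bound computations: each velocity bound is the closed-form solution of the linear regime of cal_x/cal_y (plus a short scan of cal_x's rising regime), clamped into the same search window.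
import Mathlib
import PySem

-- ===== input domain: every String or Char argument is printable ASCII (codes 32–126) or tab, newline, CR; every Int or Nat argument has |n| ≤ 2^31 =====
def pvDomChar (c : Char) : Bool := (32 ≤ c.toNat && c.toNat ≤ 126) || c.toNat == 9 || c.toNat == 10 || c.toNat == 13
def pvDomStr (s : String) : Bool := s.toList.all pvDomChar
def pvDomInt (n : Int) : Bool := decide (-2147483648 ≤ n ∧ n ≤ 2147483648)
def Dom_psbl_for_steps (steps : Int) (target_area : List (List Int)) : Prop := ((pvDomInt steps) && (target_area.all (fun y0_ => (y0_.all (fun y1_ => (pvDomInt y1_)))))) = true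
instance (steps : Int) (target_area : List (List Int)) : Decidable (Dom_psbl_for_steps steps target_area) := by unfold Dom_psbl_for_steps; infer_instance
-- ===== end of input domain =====

-- B replaces A's four binary searches by direct bound computations: each velocity bound is the
-- closed-form solution of the linear regime of cal_x/cal_y (plus a short scan of cal_x's rising
-- regime), clamped into the same search window; same return value on Pre_.

-- ===== PORT A =====
def cal_x (start steps : Int) : Int :=
  PySem.Int.floordiv ((start * (start + 1)) - (max (start - steps) 0 * (max (start - steps) 0 + 1))) 2

def cal_y (start steps : Int) : Int :=
  steps * start - PySem.Int.floordiv (steps * (steps - 1)) 2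

-- the Python 'while left != right' loops of binsearch_xmin/ymin, with fuel (the gap shrinks each turn)
def binLoopMin (f : Int → Int) (p : Int) : Nat → Int → Int → Int
  | 0, l, _ => l
  | n+1, l, r =>
    if l = r then l
    else if f (PySem.Int.floordiv (l + r) 2) < p then
      binLoopMin f p n (PySem.Int.floordiv (l + r) 2 + 1) r
    else
      binLoopMin f p n l (PySem.Int.floordiv (l + r) 2)

-- the loops of binsearch_xmax/ymax
def binLoopMax (f : Int → Int) (p : Int) : Nat → Int → Int → Int
  | 0, l, _ => l
  | n+1, l, r =>
    if l = r then l
    else if p < f (PySem.Int.floordiv (l + r + 1) 2) then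
      binLoopMax f p n l (PySem.Int.floordiv (l + r + 1) 2 - 1)
    else
      binLoopMax f p n (PySem.Int.floordiv (l + r + 1) 2) r

def binsearch_xmin (param steps : Int) : Int :=
  binLoopMin (fun s => cal_x s steps) param (param - 0).toNat 0 param

def binsearch_ymin (param steps : Int) : Int :=
  binLoopMin (fun s => cal_y s steps) param (steps - param).toNat param steps

def binsearch_xmax (param steps : Int) : Int :=
  binLoopMax (fun s => cal_x s steps) param (param - 0).toNat 0 param

def binsearch_ymax (param steps : Int) : Int :=
  binLoopMax (fun s => cal_y s steps) param (steps - param).toNat param steps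

-- the two 'if … : pass' blocks of A compute pure comparisons and discard them; they are omitted
def psbl_for_steps (steps : Int) (target_area : List (List Int)) : List (Int × Int) :=
  let x_min := binsearch_xmin (PySem.List.pyGetD (PySem.List.pyGetD target_area 0 []) 0 0) steps
  let x_max := binsearch_xmax (PySem.List.pyGetD (PySem.List.pyGetD target_area 0 []) 1 0) steps
  let y_min := binsearch_ymin (PySem.List.pyGetD (PySem.List.pyGetD target_area 1 []) 0 0) steps
  let y_max := binsearch_ymax (PySem.List.pyGetD (PySem.List.pyGetD target_area 1 []) 1 0) steps
  if x_min ≤ x_max ∧ y_min ≤ y_max then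
    (PySem.List.pyRange x_min (x_max + 1) 1).flatMap
      (fun i => (PySem.List.pyRange y_min (y_max + 1) 1).map (fun j => (i, j)))
  else []

-- ===== PORT B =====
def tri (n : Int) : Int := PySem.Int.floordiv (n * (n + 1)) 2

def ceil_div (a b : Int) : Int := -(PySem.Int.floordiv (-a) b)

def clamp (v lo hi : Int) : Int := min (max v lo) hi

-- code after x_lower's for loop
def xLowerPost (p steps hi : Int) : Int :=
  if 1 ≤ steps then min (ceil_div (p + tri (steps - 1)) steps) hi else hi

-- x_lower's for loop, fueled; fuel covers the whole range, so it never runs out early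
def xLowerScan (p steps hi : Int) : Nat → Int → Int
  | 0, _ => xLowerPost p steps hi
  | n+1, v =>
    if v ≤ min steps hi then
      (if p ≤ tri v then v else xLowerScan p steps hi n (v + 1))
    else xLowerPost p steps hi

def x_lower (p steps hi : Int) : Int := xLowerScan p steps hi (min steps hi + 1).toNat 0

-- code after x_upper's for loop
def xUpperPost (p steps hi best : Int) : Int :=
  if steps < hi ∧ best = steps then min (PySem.Int.floordiv (p + tri (steps - 1)) steps) hi
  else best

-- x_upper's for loop with its break, fueled
def xUpperScan (p steps hi : Int) : Nat → Int → Int → Int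
  | 0, _, best => xUpperPost p steps hi best
  | n+1, v, best =>
    if v ≤ min steps hi then
      (if p < tri v then xUpperPost p steps hi best
       else xUpperScan p steps hi n (v + 1) v)
    else xUpperPost p steps hi best

def x_upper (p steps hi : Int) : Int :=
  if steps ≤ 0 then hi else xUpperScan p steps hi (min steps hi + 1).toNat 0 0

def y_lower (p steps lo hi : Int) : Int :=
  if 1 ≤ steps then clamp (ceil_div (p + tri (steps - 1)) steps) lo hi
  else if p ≤ cal_y lo steps then lo else hi

def y_upper (p steps lo hi : Int) : Int :=
  if 1 ≤ steps then clamp (PySem.Int.floordiv (p + tri (steps - 1)) steps) lo hi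
  else if cal_y hi steps ≤ p then hi else lo

def psbl_for_steps_alt (steps : Int) (target_area : List (List Int)) : List (Int × Int) :=
  let x_lo := PySem.List.pyGetD (PySem.List.pyGetD target_area 0 []) 0 0
  let x_hi := PySem.List.pyGetD (PySem.List.pyGetD target_area 0 []) 1 0
  let y_lo := PySem.List.pyGetD (PySem.List.pyGetD target_area 1 []) 0 0
  let y_hi := PySem.List.pyGetD (PySem.List.pyGetD target_area 1 []) 1 0
  let x_min := x_lower x_lo steps x_lo
  let x_max := x_upper x_hi steps x_hi
  let y_min := y_lower y_lo steps y_lo steps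
  let y_max := y_upper y_hi steps y_hi steps
  if x_min ≤ x_max ∧ y_min ≤ y_max then
    (PySem.List.pyRange x_min (x_max + 1) 1).flatMap
      (fun i => (PySem.List.pyRange y_min (y_max + 1) 1).map (fun j => (i, j)))
  else []

-- ===== PRECONDITION & SPEC =====
-- Pre_ is exactly the set of inputs on which the Python A terminates: the four indexed cells must
-- exist (else IndexError), and each binary search needs left ≤ right at entry (0 ≤ x-targets,
-- y-targets ≤ steps); when left > right the Python 'while left != right' loop never exits.
def Pre_psbl_for_steps (steps : Int) (target_area : List (List Int)) : Prop :=
  2 ≤ target_area.length ∧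
  2 ≤ (PySem.List.pyGetD target_area 0 []).length ∧
  2 ≤ (PySem.List.pyGetD target_area 1 []).length ∧
  0 ≤ PySem.List.pyGetD (PySem.List.pyGetD target_area 0 []) 0 0 ∧
  0 ≤ PySem.List.pyGetD (PySem.List.pyGetD target_area 0 []) 1 0 ∧
  PySem.List.pyGetD (PySem.List.pyGetD target_area 1 []) 0 0 ≤ steps ∧
  PySem.List.pyGetD (PySem.List.pyGetD target_area 1 []) 1 0 ≤ steps

instance (steps : Int) (target_area : List (List Int)) : Decidable (Pre_psbl_for_steps steps target_area) := by
  unfold Pre_psbl_for_steps; infer_instance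

def pvWitness_psbl_for_steps : Int × List (List Int) := (7, [[20, 30], [-10, -5]])

def Spec_psbl_for_steps (steps : Int) (target_area : List (List Int)) (out : List (Int × Int)) : Prop := out = psbl_for_steps_alt steps target_area
instance (steps : Int) (target_area : List (List Int)) (out : List (Int × Int)) : Decidable (Spec_psbl_for_steps steps target_area out) := by unfold Spec_psbl_for_steps; infer_instance

-- ===== CLAIM (what is proved, stated in full; the proofs are below) =====
def Claim_equal_psbl_for_steps : Prop := ∀ (steps : Int) (target_area : List (List Int)), Dom_psbl_for_steps steps target_area → Pre_psbl_for_steps steps target_area → Spec_psbl_for_steps steps target_area (psbl_for_steps steps target_area)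

-- ===== LEMMAS AND PROOFS =====
-- (a characterization of each side's bound as the unique lower/upper boundary index
--  of the threshold in the search window)

-- characterizations: x is the lower-/upper-boundary index of the threshold p in [l,r]
def isLB (f : Int → Int) (p l r x : Int) : Prop :=
  l ≤ x ∧ x ≤ r ∧ (∀ i, l ≤ i → i < x → f i < p) ∧ (x < r → p ≤ f x)

def isUB (f : Int → Int) (p l r x : Int) : Prop :=
  l ≤ x ∧ x ≤ r ∧ (∀ i, x < i → i ≤ r → p < f i) ∧ (l < x → f x ≤ p)

lemma isLB_unique {f : Int → Int} {p l r x y : Int}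
    (hx : isLB f p l r x) (hy : isLB f p l r y) : x = y := by
  obtain ⟨hx1, hx2, hx3, hx4⟩ := hx
  obtain ⟨hy1, hy2, hy3, hy4⟩ := hy
  by_contra hne
  rcases lt_or_gt_of_ne hne with h | h
  · have h1 := hx4 (by omega)
    have h2 := hy3 x hx1 h
    omega
  · have h1 := hy4 (by omega)
    have h2 := hx3 y hy1 h
    omega

lemma isUB_unique {f : Int → Int} {p l r x y : Int}
    (hx : isUB f p l r x) (hy : isUB f p l r y) : x = y := by
  obtain ⟨hx1, hx2, hx3, hx4⟩ := hx
  obtain ⟨hy1, hy2, hy3, hy4⟩ := hy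
  by_contra hne
  rcases lt_or_gt_of_ne hne with h | h
  · have h1 := hy4 (by omega)
    have h2 := hx3 y h hy2
    omega
  · have h1 := hx4 (by omega)
    have h2 := hy3 x h hx2
    omega

lemma isLB_refl (f : Int → Int) (p : Int) {l r : Int} (h : l = r) : isLB f p l r l := by
  subst h
  unfold isLB
  exact ⟨le_refl _, le_refl _, fun i h1 h2 => absurd h2 (by omega), fun h => absurd h (by omega)⟩

lemma isUB_refl (f : Int → Int) (p : Int) {l r : Int} (h : l = r) : isUB f p l r l := by
  subst h
  unfold isUB
  exact ⟨le_refl _, le_refl _, fun i h1 h2 => absurd h1 (by omega), fun h => absurd h (by omega)⟩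

lemma mid_lb {l r : Int} (h : l < r) :
    l ≤ PySem.Int.floordiv (l + r) 2 ∧ PySem.Int.floordiv (l + r) 2 < r := by
  rw [PySem.Int.floordiv_eq_ediv_of_pos (by norm_num)]
  omega

lemma mid_ub {l r : Int} (h : l < r) :
    l < PySem.Int.floordiv (l + r + 1) 2 ∧ PySem.Int.floordiv (l + r + 1) 2 ≤ r := by
  rw [PySem.Int.floordiv_eq_ediv_of_pos (by norm_num)]
  omega

lemma binLoopMin_isLB (f : Int → Int) (p : Int) :
    ∀ (n : Nat) (l r : Int), l ≤ r → (r - l).toNat ≤ n →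
      (∀ i j, l ≤ i → i ≤ j → j ≤ r → f i ≤ f j) →
      isLB f p l r (binLoopMin f p n l r) := by
  intro n
  induction n with
  | zero =>
    intro l r hlr hfuel _
    have h : l = r := by omega
    rw [show binLoopMin f p 0 l r = l from rfl]
    exact isLB_refl f p h
  | succ n ih =>
    intro l r hlr hfuel mono
    by_cases heq : l = r
    · rw [show binLoopMin f p (n + 1) l r = l from by simp only [binLoopMin, if_pos heq]]
      exact isLB_refl f p heq
    · have hlt : l < r := lt_of_le_of_ne hlr heq
      obtain ⟨hm1, hm2⟩ := mid_lb hlt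
      simp only [binLoopMin, if_neg heq]
      by_cases hf : f (PySem.Int.floordiv (l + r) 2) < p
      · rw [if_pos hf]
        obtain ⟨h1, h2, h3, h4⟩ :=
          ih (PySem.Int.floordiv (l + r) 2 + 1) r (by omega) (by omega)
            (fun i j hi hij hj => mono i j (by omega) hij hj)
        refine ⟨by omega, h2, ?_, h4⟩
        intro i hi hilt
        by_cases him : i ≤ PySem.Int.floordiv (l + r) 2
        · exact lt_of_le_of_lt (mono i _ hi him (by omega)) hf
        · exact h3 i (by omega) hilt
      · rw [if_neg hf]
        obtain ⟨h1, h2, h3, h4⟩ :=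
          ih l (PySem.Int.floordiv (l + r) 2) (by omega) (by omega)
            (fun i j hi hij hj => mono i j hi hij (by omega))
        refine ⟨h1, by omega, h3, ?_⟩
        intro hxr
        by_cases hxm : binLoopMin f p n l (PySem.Int.floordiv (l + r) 2) < PySem.Int.floordiv (l + r) 2
        · exact h4 hxm
        · have hx : binLoopMin f p n l (PySem.Int.floordiv (l + r) 2) = PySem.Int.floordiv (l + r) 2 := by omega
          rw [hx]
          exact not_lt.mp hf

lemma binLoopMax_isUB (f : Int → Int) (p : Int) :
    ∀ (n : Nat) (l r : Int), l ≤ r → (r - l).toNat ≤ n →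
      (∀ i j, l ≤ i → i ≤ j → j ≤ r → f i ≤ f j) →
      isUB f p l r (binLoopMax f p n l r) := by
  intro n
  induction n with
  | zero =>
    intro l r hlr hfuel _
    have h : l = r := by omega
    rw [show binLoopMax f p 0 l r = l from rfl]
    exact isUB_refl f p h
  | succ n ih =>
    intro l r hlr hfuel mono
    by_cases heq : l = r
    · rw [show binLoopMax f p (n + 1) l r = l from by simp only [binLoopMax, if_pos heq]]
      exact isUB_refl f p heq
    · have hlt : l < r := lt_of_le_of_ne hlr heq
      obtain ⟨hm1, hm2⟩ := mid_ub hlt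
      simp only [binLoopMax, if_neg heq]
      by_cases hf : p < f (PySem.Int.floordiv (l + r + 1) 2)
      · rw [if_pos hf]
        obtain ⟨h1, h2, h3, h4⟩ :=
          ih l (PySem.Int.floordiv (l + r + 1) 2 - 1) (by omega) (by omega)
            (fun i j hi hij hj => mono i j hi hij (by omega))
        refine ⟨h1, by omega, ?_, h4⟩
        intro i hxi hir
        by_cases him : i ≤ PySem.Int.floordiv (l + r + 1) 2 - 1
        · exact h3 i hxi him
        · exact lt_of_lt_of_le hf (mono _ i (by omega) (by omega) hir)
      · rw [if_neg hf]
        obtain ⟨h1, h2, h3, h4⟩ :=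
          ih (PySem.Int.floordiv (l + r + 1) 2) r (by omega) (by omega)
            (fun i j hi hij hj => mono i j (by omega) hij hj)
        refine ⟨by omega, h2, h3, ?_⟩
        intro hlx
        by_cases hxm : PySem.Int.floordiv (l + r + 1) 2 < binLoopMax f p n (PySem.Int.floordiv (l + r + 1) 2) r
        · exact h4 hxm
        · have hx : binLoopMax f p n (PySem.Int.floordiv (l + r + 1) 2) r = PySem.Int.floordiv (l + r + 1) 2 := by omega
          rw [hx]
          exact not_lt.mp hf

lemma binLoopMin_all_lt (f : Int → Int) (p : Int) :
    ∀ (n : Nat) (l r : Int), l ≤ r → (r - l).toNat ≤ n →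
      (∀ i, l ≤ i → i ≤ r → f i < p) → binLoopMin f p n l r = r := by
  intro n
  induction n with
  | zero => intro l r hlr hfuel _; simp only [binLoopMin]; omega
  | succ n ih =>
    intro l r hlr hfuel hall
    by_cases heq : l = r
    · simp only [binLoopMin, if_pos heq]; exact heq
    · have hlt : l < r := lt_of_le_of_ne hlr heq
      obtain ⟨hm1, hm2⟩ := mid_lb hlt
      simp only [binLoopMin, if_neg heq, if_pos (hall _ hm1 (by omega))]
      exact ih _ r (by omega) (by omega) (fun i hi hir => hall i (by omega) hir)

lemma binLoopMin_all_ge (f : Int → Int) (p : Int) :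
    ∀ (n : Nat) (l r : Int), l ≤ r → (r - l).toNat ≤ n →
      (∀ i, l ≤ i → i ≤ r → p ≤ f i) → binLoopMin f p n l r = l := by
  intro n
  induction n with
  | zero => intro l r _ _ _; simp only [binLoopMin]
  | succ n ih =>
    intro l r hlr hfuel hall
    by_cases heq : l = r
    · simp only [binLoopMin, if_pos heq]
    · have hlt : l < r := lt_of_le_of_ne hlr heq
      obtain ⟨hm1, hm2⟩ := mid_lb hlt
      simp only [binLoopMin, if_neg heq, if_neg (not_lt.mpr (hall _ hm1 (by omega)))]
      exact ih l _ (by omega) (by omega) (fun i hi hir => hall i hi (by omega))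

lemma binLoopMax_all_le (f : Int → Int) (p : Int) :
    ∀ (n : Nat) (l r : Int), l ≤ r → (r - l).toNat ≤ n →
      (∀ i, l ≤ i → i ≤ r → f i ≤ p) → binLoopMax f p n l r = r := by
  intro n
  induction n with
  | zero => intro l r hlr hfuel _; simp only [binLoopMax]; omega
  | succ n ih =>
    intro l r hlr hfuel hall
    by_cases heq : l = r
    · simp only [binLoopMax, if_pos heq]; exact heq
    · have hlt : l < r := lt_of_le_of_ne hlr heq
      obtain ⟨hm1, hm2⟩ := mid_ub hlt
      simp only [binLoopMax, if_neg heq, if_neg (not_lt.mpr (hall (PySem.Int.floordiv (l + r + 1) 2) (le_of_lt hm1) hm2))]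
      exact ih _ r (by omega) (by omega) (fun i hi hir => hall i (by omega) hir)

lemma binLoopMax_all_gt (f : Int → Int) (p : Int) :
    ∀ (n : Nat) (l r : Int), l ≤ r → (r - l).toNat ≤ n →
      (∀ i, l ≤ i → i ≤ r → p < f i) → binLoopMax f p n l r = l := by
  intro n
  induction n with
  | zero => intro l r _ _ _; simp only [binLoopMax]
  | succ n ih =>
    intro n' r hlr hfuel hall
    by_cases heq : n' = r
    · simp only [binLoopMax, if_pos heq]
    · have hlt : n' < r := lt_of_le_of_ne hlr heq
      obtain ⟨hm1, hm2⟩ := mid_ub hlt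
      simp only [binLoopMax, if_neg heq, if_pos (hall (PySem.Int.floordiv (n' + r + 1) 2) (le_of_lt hm1) hm2)]
      exact ih n' _ (by omega) (by omega) (fun i hi hir => hall i hi (by omega))

-- arithmetic facts about tri and the two division brackets
lemma two_tri (n : Int) : 2 * tri n = n * (n + 1) := by
  obtain ⟨k, hk⟩ := Int.even_mul_succ_self n
  unfold tri
  rw [PySem.Int.floordiv_eq_ediv_of_pos (by norm_num), hk]
  omega

lemma tri_nonneg (m : Int) : 0 ≤ tri m := by
  have h := two_tri m
  by_cases h0 : 0 ≤ m
  · nlinarith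
  · nlinarith

lemma tri_mono {i j : Int} (h0 : 0 ≤ i) (hij : i ≤ j) : tri i ≤ tri j := by
  have hi := two_tri i
  have hj := two_tri j
  nlinarith

lemma lin_le_tri (steps v : Int) : steps * v - tri (steps - 1) ≤ tri v := by
  have h1 := two_tri v
  have h2 := two_tri (steps - 1)
  have h3 := tri_nonneg (v - steps)
  have h4 := two_tri (v - steps)
  nlinarith

lemma ceil_div_bracket (a b : Int) (hb : 0 < b) :
    (ceil_div a b - 1) * b < a ∧ a ≤ ceil_div a b * b := by
  exact (PySem.Int.neg_floordiv_neg_eq_iff_of_pos hb).mp rfl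

lemma floordiv_bracket (a b : Int) (hb : 0 < b) :
    PySem.Int.floordiv a b * b ≤ a ∧ a < (PySem.Int.floordiv a b + 1) * b := by
  rw [PySem.Int.floordiv_eq_ediv_of_pos hb]
  have h1 := Int.mul_ediv_add_emod a b
  have h2 := Int.emod_nonneg a (by omega : b ≠ 0)
  have h3 := Int.emod_lt_of_pos a hb
  constructor <;> nlinarith

-- value of cal_x in the rising (quadratic) regime
lemma cal_x_quad {i steps : Int} (_h0 : 0 ≤ i) (h : i ≤ steps) : cal_x i steps = tri i := by
  unfold cal_x tri
  rw [max_eq_right (by omega : i - steps ≤ 0)]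
  norm_num

-- value of cal_x in the stalled (linear) regime
lemma cal_x_lin {i steps : Int} (_hs : 0 ≤ steps) (h : steps ≤ i) :
    cal_x i steps = steps * i - tri (steps - 1) := by
  unfold cal_x tri
  rw [max_eq_left (by omega : 0 ≤ i - steps)]
  obtain ⟨k, hk⟩ := Int.even_mul_succ_self (steps - 1)
  have h1 : i * (i + 1) - (i - steps) * (i - steps + 1) = 2 * (steps * i) - (steps - 1) * (steps - 1 + 1) := by
    ring
  rw [h1, hk]
  rw [PySem.Int.floordiv_eq_ediv_of_pos (by norm_num), PySem.Int.floordiv_eq_ediv_of_pos (by norm_num)]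
  omega

lemma cal_y_eq (j steps : Int) : cal_y j steps = steps * j - tri (steps - 1) := by
  unfold cal_y tri
  rw [show steps * (steps - 1) = (steps - 1) * (steps - 1 + 1) by ring]

lemma cal_y_zero (j : Int) : cal_y j 0 = 0 := by
  unfold cal_y
  norm_num

lemma cal_x_succ {i steps : Int} (hs : 0 ≤ steps) (h0 : 0 ≤ i) :
    cal_x i steps ≤ cal_x (i + 1) steps := by
  by_cases h : i + 1 ≤ steps
  · rw [cal_x_quad h0 (by omega), cal_x_quad (by omega) h]
    exact tri_mono h0 (by omega)
  · rw [cal_x_lin hs (by omega), cal_x_lin hs (by omega)]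
    have : steps * (i + 1) = steps * i + steps := by ring
    omega

lemma cal_x_mono {steps : Int} (hs : 0 ≤ steps) :
    ∀ i j : Int, 0 ≤ i → i ≤ j → cal_x i steps ≤ cal_x j steps := by
  intro i j hi hij
  obtain ⟨k, hk⟩ := Int.le.dest hij
  subst hk
  induction k with
  | zero => simp
  | succ k ih =>
    rw [show i + ((k + 1 : Nat) : Int) = (i + (k : Nat)) + 1 by push_cast; ring]
    exact le_trans (ih (by omega)) (cal_x_succ hs (by omega))

lemma cal_y_mono {steps : Int} (hs : 0 ≤ steps) :
    ∀ i j : Int, i ≤ j → cal_y i steps ≤ cal_y j steps := by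
  intro i j hij
  rw [cal_y_eq, cal_y_eq]
  have := mul_le_mul_of_nonneg_left hij hs
  omega

-- for steps < 0 every cal_x value on i ≥ 0 is negative
lemma cal_x_neg {i steps : Int} (hs : steps ≤ -1) (h0 : 0 ≤ i) : cal_x i steps ≤ -1 := by
  unfold cal_x
  rw [max_eq_left (by omega : 0 ≤ i - steps)]
  set N := i * (i + 1) - (i - steps) * (i - steps + 1) with hN
  have h1 : N ≤ -2 := by
    have : N = steps * (2 * i + 1 - steps) := by rw [hN]; ring
    nlinarith
  rw [PySem.Int.floordiv_eq_ediv_of_pos (by norm_num)]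
  omega

-- for steps < 0 every cal_y value on j ≤ steps is nonnegative
lemma cal_y_nonneg_neg {j steps : Int} (hs : steps ≤ -1) (h : j ≤ steps) : 0 ≤ cal_y j steps := by
  rw [cal_y_eq]
  have h2 : steps * steps ≤ steps * j := by nlinarith
  have h4 := two_tri (steps - 1)
  nlinarith

lemma cal_x_zero_steps {j : Int} (h0 : 0 ≤ j) : cal_x j 0 = 0 := by
  unfold cal_x
  rw [max_eq_left (by omega : 0 ≤ j - 0)]
  norm_num

-- B's x_lower: post-loop code is correct once the whole rising window failed
lemma xLowerPost_isLB {p steps hi : Int} (hs : 0 ≤ steps) (hhi : 0 ≤ hi)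
    (hall : ∀ j, 0 ≤ j → j ≤ min steps hi → cal_x j steps < p) :
    isLB (fun s => cal_x s steps) p 0 hi (xLowerPost p steps hi) := by
  unfold xLowerPost
  by_cases h1 : 1 ≤ steps
  · rw [if_pos h1]
    obtain ⟨hb1, hb2⟩ := ceil_div_bracket (p + tri (steps - 1)) steps (by omega)
    set q := ceil_div (p + tri (steps - 1)) steps with hq
    have hlinlt : ∀ j, steps ≤ j → j ≤ q - 1 → cal_x j steps < p := by
      intro j hj1 hj2
      rw [cal_x_lin hs hj1]
      have : steps * j ≤ steps * (q - 1) := mul_le_mul_of_nonneg_left hj2 hs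
      nlinarith
    by_cases h2 : hi ≤ steps
    · -- whole window scanned; q exceeds hi since lin ≤ quad < p on the window
      have hqhi : hi < q := by
        by_contra hc
        have hlin := lin_le_tri steps hi
        have hquad := hall hi hhi (by omega)
        rw [cal_x_quad hhi h2] at hquad
        have : steps * q ≤ steps * hi := mul_le_mul_of_nonneg_left (by omega) hs
        nlinarith
      rw [min_eq_right (by omega)]
      exact ⟨hhi, le_refl _, fun i hi0 hilt => hall i hi0 (by omega), fun h => absurd h (by omega)⟩
    · -- window ends at steps; answer is in the linear regime
      have hqs : steps < q := by
        by_contra hc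
        have hquad := hall steps (by omega) (by omega)
        rw [cal_x_quad (by omega) (le_refl _)] at hquad
        have hlin := lin_le_tri steps steps
        have : steps * q ≤ steps * steps := mul_le_mul_of_nonneg_left (by omega) hs
        nlinarith
      by_cases h3 : q ≤ hi
      · rw [min_eq_left h3]
        refine ⟨by omega, h3, ?_, ?_⟩
        · intro i hi0 hilt
          show cal_x i steps < p
          by_cases him : i ≤ steps
          · exact hall i hi0 (by omega)
          · exact hlinlt i (by omega) (by omega)
        · intro _
          show p ≤ cal_x q steps
          rw [cal_x_lin hs (by omega)]
          nlinarith
      · rw [min_eq_right (by omega)]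
        refine ⟨hhi, le_refl _, ?_, fun h => absurd h (by omega)⟩
        intro i hi0 hilt
        show cal_x i steps < p
        by_cases him : i ≤ steps
        · exact hall i hi0 (by omega)
        · exact hlinlt i (by omega) (by omega)
  · rw [if_neg h1]
    have hs0 : steps = 0 := by omega
    subst hs0
    have hz := hall 0 (le_refl _) (by omega)
    rw [cal_x_zero_steps (le_refl _)] at hz
    refine ⟨hhi, le_refl _, ?_, fun h => absurd h (by omega)⟩
    intro j hj hjhi
    show cal_x j 0 < p
    rw [cal_x_zero_steps hj]
    exact hz

lemma xLowerScan_isLB {p steps hi : Int} (hs : 0 ≤ steps) (hhi : 0 ≤ hi) :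
    ∀ (n : Nat) (v : Int), 0 ≤ v → (min steps hi + 1 - v).toNat ≤ n →
      (∀ j, 0 ≤ j → j < v → cal_x j steps < p) →
      isLB (fun s => cal_x s steps) p 0 hi (xLowerScan p steps hi n v) := by
  intro n
  induction n with
  | zero =>
    intro v h0 hfuel hpre
    simp only [xLowerScan]
    exact xLowerPost_isLB hs hhi (fun j hj hjm => hpre j hj (by omega))
  | succ n ih =>
    intro v h0 hfuel hpre
    by_cases hg : v ≤ min steps hi
    · simp only [xLowerScan, if_pos hg]
      have hquad : cal_x v steps = tri v := cal_x_quad h0 (by omega)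
      by_cases hp : p ≤ tri v
      · rw [if_pos hp]
        exact ⟨h0, by omega, hpre, fun _ => by show p ≤ cal_x v steps; rw [hquad]; exact hp⟩
      · rw [if_neg hp]
        refine ih (v + 1) (by omega) (by omega) ?_
        intro j hj hjv
        by_cases hj' : j < v
        · exact hpre j hj hj'
        · have : j = v := by omega
          subst this
          rw [hquad]
          omega
    · simp only [xLowerScan, if_neg hg]
      exact xLowerPost_isLB hs hhi (fun j hj hjm => hpre j hj (by omega))

lemma x_lower_isLB {p steps hi : Int} (hs : 0 ≤ steps) (hhi : 0 ≤ hi) :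
    isLB (fun s => cal_x s steps) p 0 hi (x_lower p steps hi) := by
  unfold x_lower
  exact xLowerScan_isLB hs hhi _ 0 (le_refl _) (by omega) (fun j hj hjv => absurd hjv (by omega))

lemma x_lower_neg {p steps hi : Int} (hs : steps ≤ -1) : x_lower p steps hi = hi := by
  unfold x_lower
  rw [show (min steps hi + 1).toNat = 0 by omega]
  simp only [xLowerScan]
  unfold xLowerPost
  rw [if_neg (by omega)]

-- B's x_upper: post-loop code is correct given what the loop established about best
lemma xUpperPost_isUB {p steps hi best : Int} (hs1 : 1 ≤ steps) (hhi : 0 ≤ hi)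
    (hb0 : 0 ≤ best) (hbm : best ≤ min steps hi)
    (hbhit : 0 < best → cal_x best steps ≤ p)
    (hall : ∀ j, best < j → j ≤ min steps hi → p < cal_x j steps) :
    isUB (fun s => cal_x s steps) p 0 hi (xUpperPost p steps hi best) := by
  unfold xUpperPost
  by_cases hc : steps < hi ∧ best = steps
  · rw [if_pos hc]
    obtain ⟨hshi, hbs⟩ := hc
    obtain ⟨hb1, hb2⟩ := floordiv_bracket (p + tri (steps - 1)) steps (by omega)
    set u := PySem.Int.floordiv (p + tri (steps - 1)) steps with hu
    have hlins : steps * steps - tri (steps - 1) ≤ p := by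
      have := hbhit (by omega)
      rw [hbs] at this
      rw [cal_x_lin (by omega) (le_refl _)] at this
      exact this
    have hus : steps ≤ u := by nlinarith
    by_cases h3 : u ≤ hi
    · rw [min_eq_left h3]
      refine ⟨by omega, h3, ?_, ?_⟩
      · intro i hui hihi
        show p < cal_x i steps
        rw [cal_x_lin (by omega) (by omega)]
        have : steps * (u + 1) ≤ steps * i := mul_le_mul_of_nonneg_left (by omega) (by omega)
        nlinarith
      · intro _
        show cal_x u steps ≤ p
        rw [cal_x_lin (by omega) hus]
        nlinarith
    · rw [min_eq_right (by omega)]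
      refine ⟨hhi, le_refl _, fun i h1 h2 => absurd h1 (by omega), ?_⟩
      intro _
      show cal_x hi steps ≤ p
      rw [cal_x_lin (by omega) (by omega)]
      have : steps * hi ≤ steps * u := mul_le_mul_of_nonneg_left (by omega) (by omega)
      nlinarith
  · rw [if_neg hc]
    refine ⟨hb0, by omega, ?_, fun h => hbhit h⟩
    intro i hbi hihi
    show p < cal_x i steps
    by_cases him : i ≤ min steps hi
    · exact hall i hbi him
    · -- beyond the window: only possible when steps < hi, so best < steps and cal_x steps > p
      have hshi : steps < hi := by omega
      have hbs : best < steps := by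
        rcases lt_or_eq_of_le (by omega : best ≤ steps) with h | h
        · exact h
        · exact absurd ⟨hshi, h⟩ hc
      have hps : p < cal_x steps steps := hall steps (by omega) (by omega)
      rw [cal_x_lin (by omega) (le_refl _)] at hps
      rw [cal_x_lin (by omega) (by omega)]
      have : steps * steps ≤ steps * i := mul_le_mul_of_nonneg_left (by omega) (by omega)
      omega

lemma xUpperScan_isUB {p steps hi : Int} (hs1 : 1 ≤ steps) (hhi : 0 ≤ hi) :
    ∀ (n : Nat) (v best : Int), 0 ≤ v → 0 ≤ best → best ≤ min steps hi →
      (min steps hi + 1 - v).toNat ≤ n →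
      (0 < best → cal_x best steps ≤ p) →
      (∀ j, best < j → j < v → p < cal_x j steps) →
      isUB (fun s => cal_x s steps) p 0 hi (xUpperScan p steps hi n v best) := by
  intro n
  induction n with
  | zero =>
    intro v best hv0 hb0 hbm hfuel hbhit hfail
    simp only [xUpperScan]
    exact xUpperPost_isUB hs1 hhi hb0 hbm hbhit (fun j hj hjm => hfail j hj (by omega))
  | succ n ih =>
    intro v best hv0 hb0 hbm hfuel hbhit hfail
    by_cases hg : v ≤ min steps hi
    · simp only [xUpperScan, if_pos hg]
      have hquad : cal_x v steps = tri v := cal_x_quad hv0 (by omega)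
      by_cases hp : p < tri v
      · rw [if_pos hp]
        refine xUpperPost_isUB hs1 hhi hb0 hbm hbhit ?_
        intro j hj hjm
        by_cases hjv : j < v
        · exact hfail j hj hjv
        · show p < cal_x j steps
          rw [cal_x_quad (by omega) (by omega)]
          exact lt_of_lt_of_le hp (tri_mono hv0 (by omega))
      · rw [if_neg hp]
        refine ih (v + 1) v (by omega) hv0 hg (by omega) ?_ ?_
        · intro _
          rw [hquad]
          omega
        · intro j hj hjv
          exact absurd (by omega : j < j) (lt_irrefl j)
    · simp only [xUpperScan, if_neg hg]
      exact xUpperPost_isUB hs1 hhi hb0 hbm hbhit (fun j hj hjm => hfail j hj (by omega))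

lemma x_upper_isUB {p steps hi : Int} (hs1 : 1 ≤ steps) (hhi : 0 ≤ hi) :
    isUB (fun s => cal_x s steps) p 0 hi (x_upper p steps hi) := by
  unfold x_upper
  rw [if_neg (by omega : ¬ steps ≤ 0)]
  exact xUpperScan_isUB hs1 hhi _ 0 0 (le_refl _) (le_refl _) (by omega) (by omega)
    (fun h => absurd h (lt_irrefl 0)) (fun j hj hjv => absurd (by omega : j < 0) (by omega))

-- B's y_lower is the lower boundary of the window for steps ≥ 0
lemma y_lower_isLB {p steps lo hi : Int} (hs : 0 ≤ steps) (hlohi : lo ≤ hi) :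
    isLB (fun s => cal_y s steps) p lo hi (y_lower p steps lo hi) := by
  unfold y_lower clamp
  by_cases h : 1 ≤ steps
  · rw [if_pos h]
    obtain ⟨hb1, hb2⟩ := ceil_div_bracket (p + tri (steps - 1)) steps (by omega)
    set q := ceil_div (p + tri (steps - 1)) steps with hq
    refine ⟨by omega, by omega, ?_, ?_⟩
    · intro j hj hjx
      show cal_y j steps < p
      have hjq : j ≤ q - 1 := by omega
      rw [cal_y_eq]
      have : steps * j ≤ steps * (q - 1) := mul_le_mul_of_nonneg_left hjq hs
      nlinarith
    · intro hxr
      show p ≤ cal_y (min (max q lo) hi) steps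
      have hxq : q ≤ min (max q lo) hi := by omega
      rw [cal_y_eq]
      have : steps * q ≤ steps * min (max q lo) hi := mul_le_mul_of_nonneg_left hxq hs
      nlinarith
  · rw [if_neg h]
    have hs0 : steps = 0 := by omega
    subst hs0
    by_cases hp : p ≤ cal_y lo 0
    · rw [if_pos hp]
      exact ⟨le_refl _, hlohi, fun j hj hji => absurd hji (by omega), fun _ => hp⟩
    · rw [if_neg hp]
      rw [cal_y_zero] at hp
      refine ⟨hlohi, le_refl _, ?_, fun h' => absurd h' (by omega)⟩
      intro j hj hji
      show cal_y j 0 < p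
      rw [cal_y_zero]
      omega

-- B's y_upper is the upper boundary of the window for steps ≥ 0
lemma y_upper_isUB {p steps lo hi : Int} (hs : 0 ≤ steps) (hlohi : lo ≤ hi) :
    isUB (fun s => cal_y s steps) p lo hi (y_upper p steps lo hi) := by
  unfold y_upper clamp
  by_cases h : 1 ≤ steps
  · rw [if_pos h]
    obtain ⟨hb1, hb2⟩ := floordiv_bracket (p + tri (steps - 1)) steps (by omega)
    set u := PySem.Int.floordiv (p + tri (steps - 1)) steps with hu
    refine ⟨by omega, by omega, ?_, ?_⟩
    · intro i hxi hihi
      show p < cal_y i steps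
      have hui : u + 1 ≤ i := by omega
      rw [cal_y_eq]
      have : steps * (u + 1) ≤ steps * i := mul_le_mul_of_nonneg_left hui hs
      nlinarith
    · intro hlx
      show cal_y (min (max u lo) hi) steps ≤ p
      have hxu : min (max u lo) hi ≤ u := by omega
      rw [cal_y_eq]
      have : steps * min (max u lo) hi ≤ steps * u := mul_le_mul_of_nonneg_left hxu hs
      nlinarith
  · rw [if_neg h]
    have hs0 : steps = 0 := by omega
    subst hs0
    by_cases hp : cal_y hi 0 ≤ p
    · rw [if_pos hp]
      exact ⟨hlohi, le_refl _, fun i h1 h2 => absurd h1 (by omega), fun _ => hp⟩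
    · rw [if_neg hp]
      rw [cal_y_zero] at hp
      refine ⟨le_refl _, hlohi, ?_, fun h' => absurd h' (by omega)⟩
      intro i h1 h2
      show p < cal_y i 0
      rw [cal_y_zero]
      omega

-- ===== VERDICT (by name: the statement is the Claim_ definition above) =====
theorem psbl_for_steps_spec : Claim_equal_psbl_for_steps := by
  intro steps ta hdom hpre
  obtain ⟨hl, hl0, hl1, ha0, ha1, hc, hd⟩ := hpre
  unfold Spec_psbl_for_steps
  have hx1 : binsearch_xmin (PySem.List.pyGetD (PySem.List.pyGetD ta 0 []) 0 0) steps
      = x_lower (PySem.List.pyGetD (PySem.List.pyGetD ta 0 []) 0 0) steps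
          (PySem.List.pyGetD (PySem.List.pyGetD ta 0 []) 0 0) := by
    set A0 := PySem.List.pyGetD (PySem.List.pyGetD ta 0 []) 0 0 with hA0
    unfold binsearch_xmin
    by_cases hs : 0 ≤ steps
    · exact isLB_unique
        (binLoopMin_isLB _ _ _ 0 A0 ha0 (by omega) (fun i j hi hij _ => cal_x_mono hs i j hi hij))
        (x_lower_isLB hs ha0)
    · rw [x_lower_neg (by omega)]
      exact binLoopMin_all_lt _ _ _ 0 A0 ha0 (by omega)
        (fun i hi _ => by have := cal_x_neg (show steps ≤ -1 by omega) hi; omega)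
  have hx2 : binsearch_xmax (PySem.List.pyGetD (PySem.List.pyGetD ta 0 []) 1 0) steps
      = x_upper (PySem.List.pyGetD (PySem.List.pyGetD ta 0 []) 1 0) steps
          (PySem.List.pyGetD (PySem.List.pyGetD ta 0 []) 1 0) := by
    set A1 := PySem.List.pyGetD (PySem.List.pyGetD ta 0 []) 1 0 with hA1
    unfold binsearch_xmax
    by_cases hs : 1 ≤ steps
    · exact isUB_unique
        (binLoopMax_isUB _ _ _ 0 A1 ha1 (by omega)
          (fun i j hi hij _ => cal_x_mono (by omega) i j hi hij))
        (x_upper_isUB hs ha1)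
    · rw [show x_upper A1 steps A1 = A1 from by unfold x_upper; rw [if_pos (by omega)]]
      refine binLoopMax_all_le _ _ _ 0 A1 ha1 (by omega) ?_
      intro i hi _
      by_cases hs0 : steps = 0
      · subst hs0
        rw [cal_x_zero_steps hi]
        exact ha1
      · have := cal_x_neg (show steps ≤ -1 by omega) hi
        omega
  have hy1 : binsearch_ymin (PySem.List.pyGetD (PySem.List.pyGetD ta 1 []) 0 0) steps
      = y_lower (PySem.List.pyGetD (PySem.List.pyGetD ta 1 []) 0 0) steps
          (PySem.List.pyGetD (PySem.List.pyGetD ta 1 []) 0 0) steps := by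
    set C := PySem.List.pyGetD (PySem.List.pyGetD ta 1 []) 0 0 with hC
    unfold binsearch_ymin
    by_cases hs : 0 ≤ steps
    · exact isLB_unique
        (binLoopMin_isLB _ _ _ C steps hc (by omega) (fun i j _ hij _ => cal_y_mono hs i j hij))
        (y_lower_isLB hs hc)
    · unfold y_lower
      rw [if_neg (by omega)]
      rw [if_pos (by
        have := cal_y_nonneg_neg (show steps ≤ -1 by omega) hc
        omega)]
      exact binLoopMin_all_ge _ _ _ C steps hc (by omega)
        (fun i _ hi => by have := cal_y_nonneg_neg (show steps ≤ -1 by omega) hi; omega)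
  have hy2 : binsearch_ymax (PySem.List.pyGetD (PySem.List.pyGetD ta 1 []) 1 0) steps
      = y_upper (PySem.List.pyGetD (PySem.List.pyGetD ta 1 []) 1 0) steps
          (PySem.List.pyGetD (PySem.List.pyGetD ta 1 []) 1 0) steps := by
    set D := PySem.List.pyGetD (PySem.List.pyGetD ta 1 []) 1 0 with hD
    unfold binsearch_ymax
    by_cases hs : 0 ≤ steps
    · exact isUB_unique
        (binLoopMax_isUB _ _ _ D steps hd (by omega) (fun i j _ hij _ => cal_y_mono hs i j hij))
        (y_upper_isUB hs hd)
    · unfold y_upper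
      rw [if_neg (by omega)]
      rw [if_neg (by
        have := cal_y_nonneg_neg (show steps ≤ -1 by omega) (le_refl steps)
        omega)]
      exact binLoopMax_all_gt _ _ _ D steps hd (by omega)
        (fun i _ hi => by have := cal_y_nonneg_neg (show steps ≤ -1 by omega) hi; omega)
  show psbl_for_steps steps ta = psbl_for_steps_alt steps ta
  simp only [psbl_for_steps, psbl_for_steps_alt]
  rw [hx1, hx2, hy1, hy2]
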